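-- pv_equiv track=rewrite | github.com/joaompfp/prumo | app/services/painel_analysis/parser.py | _extract_headline
-- ===== SOURCE A (Python) =====
-- def _extract_headline(text: str) -> tuple:
--     """Extract HEADLINE/SUBHEADLINE from END of text. Returns (headline, subheadline, rest_of_text).
--     Searches backwards so that HEADLINE/SUBHEADLINE placed at the end (editorial synthesis) are found.
--     Also strips leading markdown heading markers (#) from extracted values."""
--     headline = ""
--     subheadline = ""
--     lines = text.split('\n')
--     headline_idx = None
--     subheadline_idx = None
--     # Search from the end backwards
--     for i in range(len(lines) - 1, -1, -1):
--         stripped = lines[i].strip()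
--         if not headline and stripped.startswith('HEADLINE:'):
--             headline = stripped[len('HEADLINE:'):].strip()
--             headline = headline.lstrip('#').strip()  # strip markdown heading markers
--             headline_idx = i
--         elif not subheadline and stripped.startswith('SUBHEADLINE:'):
--             subheadline = stripped[len('SUBHEADLINE:'):].strip()
--             subheadline = subheadline.lstrip('#').strip()  # strip markdown heading markers
--             subheadline_idx = i
--         if headline and subheadline:
--             break
--     # Remove HEADLINE/SUBHEADLINE lines from the rest
--     indices_to_remove = set()
--     if headline_idx is not None:
--         indices_to_remove.add(headline_idx)
--     if subheadline_idx is not None: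
--         indices_to_remove.add(subheadline_idx)
--     rest_lines = [l for i, l in enumerate(lines) if i not in indices_to_remove]
--     rest = '\n'.join(rest_lines).strip()
--     return headline, subheadline, rest
-- ===== SOURCE B (Python) =====
-- def _extract_headline(text: str) -> tuple:
--     """Extract HEADLINE/SUBHEADLINE markers from the text (last occurrence wins).
--     Returns (headline, subheadline, rest_of_text)."""
--     lines = text.split('\n')
--
--     def last_match(prefix):
--         hits = [(i, s[len(prefix):].strip().lstrip('#').strip())
--                 for i, s in enumerate(map(str.strip, lines))
--                 if s.startswith(prefix)]
--         return hits[-1] if hits else (None, "")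
--
--     h_idx, headline = last_match('HEADLINE:')
--     s_idx, subheadline = last_match('SUBHEADLINE:')
--     rest = '\n'.join(l for i, l in enumerate(lines)
--                      if i != h_idx and i != s_idx).strip()
--     return headline, subheadline, rest
-- ===== Notes on version B (the rewrite author's own statement) =====
-- stated objective: simpler
-- what changed: Replaces A's backward scan with early break over a mutable four-part state by two independent forward comprehension passes that each select the last marker occurrence; Pre_ excludes texts where a marker kind occurs more than once and its last occurrence has an empty value, a first-vs-last tie among empty-valued duplicate markers on which A's keep-searching-past-empty choice is accidental.
-- outside the precondition, e.g. on _extract_headline('HEADLINE: x\nHEADLINE:'): A returns ('x', '', 'HEADLINE:'), B returns ('', '', 'HEADLINE: x')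
import Mathlib
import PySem

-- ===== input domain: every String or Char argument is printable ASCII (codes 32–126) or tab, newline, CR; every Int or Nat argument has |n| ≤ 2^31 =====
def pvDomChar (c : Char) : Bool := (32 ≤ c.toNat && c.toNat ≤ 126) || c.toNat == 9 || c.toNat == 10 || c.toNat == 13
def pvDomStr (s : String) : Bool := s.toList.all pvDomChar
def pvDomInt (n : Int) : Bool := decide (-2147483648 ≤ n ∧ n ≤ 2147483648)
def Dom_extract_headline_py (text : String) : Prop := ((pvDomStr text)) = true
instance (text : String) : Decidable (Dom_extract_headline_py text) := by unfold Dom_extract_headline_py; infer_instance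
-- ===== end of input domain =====

-- B replaces A's backward scan-with-break over a mutable four-part state by two independent
-- forward comprehension passes that each select the last marker occurrence (simpler decomposition).

-- shared value post-processing: stripped[plen:].strip().lstrip('#').strip()
-- (.lstrip('#') ported by hand as dropWhile (· == '#'): exact, Python drops every leading '#')
def pvVal (stripped : String) (plen : Int) : String :=
  PySem.Str.strip (String.ofList
    ((PySem.Str.strip (PySem.Str.slice stripped (some plen) none)).toList.dropWhile (fun c => c == '#')))

-- ===== PORT A =====
-- the backward `for i in range(len(lines)-1,-1,-1)` loop with its break, over state (headline, subheadline, headline_idx, subheadline_idx)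
def pvALoop (lines : List String) : Nat → String × String × Option Int × Option Int → String × String × Option Int × Option Int
  | 0, st => st
  | i+1, (h, s, hi, si) =>
    let stripped := PySem.Str.strip (lines.getD i "")   -- lines[i]: i is always in range here
    let st' :=
      if h = "" ∧ PySem.Str.startswith stripped "HEADLINE:" then
        (pvVal stripped 9, s, some (i : Int), si)
      else if s = "" ∧ PySem.Str.startswith stripped "SUBHEADLINE:" then
        (h, pvVal stripped 12, hi, some (i : Int))
      else (h, s, hi, si)
    if st'.1 ≠ "" ∧ st'.2.1 ≠ "" then st'              -- `if headline and subheadline: break`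
    else pvALoop lines i st'

def extract_headline_py (text : String) : String × String × String :=
  let lines := (PySem.Str.split? text "\n").getD []     -- text.split('\n'); sep ≠ "" so never raises
  let r := pvALoop lines lines.length ("", "", none, none)
  -- indices_to_remove = set(); add headline_idx/subheadline_idx if not None
  let r1 := match r.2.2.1 with | some i => (PySem.Set.empty : PySem.Set Int).add i | none => PySem.Set.empty
  let r2 := match r.2.2.2 with | some i => r1.add i | none => r1
  let rest_lines := ((PySem.List.enumerate lines).filter (fun m => !(r2.contains m.1))).map (·.2)
  (r.1, r.2.1, PySem.Str.strip (PySem.Str.join "\n" rest_lines))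

-- ===== PORT B =====
-- the `hits` comprehension: all prefixed lines, in order, with their processed values
def pvMatches (lines : List String) (p : String) : List (Int × String) :=
  ((PySem.List.enumerate (lines.map PySem.Str.strip)).filter
      (fun m => PySem.Str.startswith m.2 p)).map
    (fun m => (m.1, pvVal m.2 (PySem.Str.len p)))

-- `hits[-1] if hits else (None, "")`
def pvPickLast (lines : List String) (p : String) : Option Int × String :=
  match (pvMatches lines p).getLast? with
  | some m => (some m.1, m.2)
  | none => (none, "")

def extract_headline_py_alt (text : String) : String × String × String :=
  let lines := (PySem.Str.split? text "\n").getD []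
  let hp := pvPickLast lines "HEADLINE:"
  let sp := pvPickLast lines "SUBHEADLINE:"
  let rest_lines := ((PySem.List.enumerate lines).filter
      (fun m => some m.1 != hp.1 && some m.1 != sp.1)).map (·.2)
  (hp.2, sp.2, PySem.Str.strip (PySem.Str.join "\n" rest_lines))

-- ===== PRECONDITION & SPEC =====
-- processed values of the lines bearing a given marker, in order (Pre_-side, independent of the ports)
def pvMark (lines : List String) (p : String) : List String :=
  ((lines.map PySem.Str.strip).filter (fun s => PySem.Str.startswith s p)).map
    (fun s => pvVal s (PySem.Str.len p))

-- Pre_ excludes texts in which a marker kind (HEADLINE:/SUBHEADLINE:) occurs on more than one line and its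
-- LAST occurrence carries an empty value: there first-vs-last occurrence is an unspecified tie (A keeps the
-- earlier non-empty value, B keeps the last occurrence) and neither choice is canonical.
def Pre_extract_headline_py (text : String) : Prop :=
  let lines := (PySem.Str.split? text "\n").getD []
  ((pvMark lines "HEADLINE:").length ≤ 1 ∨ (pvMark lines "HEADLINE:").getLastD "" ≠ "") ∧
  ((pvMark lines "SUBHEADLINE:").length ≤ 1 ∨ (pvMark lines "SUBHEADLINE:").getLastD "" ≠ "")
instance (text : String) : Decidable (Pre_extract_headline_py text) := by unfold Pre_extract_headline_py; infer_instance

def pvWitness_extract_headline_py : String := "HEADLINE: a\nSUBHEADLINE: b\nbody"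

def Spec_extract_headline_py (text : String) (out : String × String × String) : Prop := out = extract_headline_py_alt text
instance (text : String) (out : String × String × String) : Decidable (Spec_extract_headline_py text out) := by unfold Spec_extract_headline_py; infer_instance

-- ===== CLAIM (what is proved, stated in full; the proofs are below) =====
def Claim_equal_extract_headline_py : Prop := ∀ (text : String), Dom_extract_headline_py text → Pre_extract_headline_py text → Spec_extract_headline_py text (extract_headline_py text)

-- ===== LEMMAS AND PROOFS =====

-- proof-side single-target backward loop (one half of A's state)
def pvF (lines : List String) (p : String) (plen : Int) : Nat → String × Option Int → String × Option Int
  | 0, st => st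
  | i+1, (v, idx) =>
    let stripped := PySem.Str.strip (lines.getD i "")
    pvF lines p plen i
      (if v = "" ∧ PySem.Str.startswith stripped p then (pvVal stripped plen, some (i : Int)) else (v, idx))

-- what the backward lock-loop computes, phrased over the in-order match list
def pvCombine (st : String × Option Int) (M : List (Int × String)) : String × Option Int :=
  if st.1 ≠ "" then st
  else
    match (M.filter (fun m => m.2 ≠ "")).getLast? with
    | some m => (m.2, some m.1)
    | none =>
      match M.head? with
      | some m => ("", some m.1)
      | none => st

lemma pv_not_both (t : String) :
    ¬ (PySem.Str.startswith t "HEADLINE:" = true ∧ PySem.Str.startswith t "SUBHEADLINE:" = true) := by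
  rintro ⟨h1, h2⟩
  rw [PySem.Str.startswith_eq, PySem.Chars.startswith_iff] at h1 h2
  obtain ⟨t1, e1⟩ := h1
  obtain ⟨t2, e2⟩ := h2
  have : ("HEADLINE:".toList) ++ t1 = ("SUBHEADLINE:".toList) ++ t2 := e1.trans e2.symm
  simp at this

-- a locked half never changes
lemma pvF_locked (lines : List String) (p : String) (plen : Int) :
    ∀ i v idx, v ≠ "" → pvF lines p plen i (v, idx) = (v, idx) := by
  intro i
  induction i with
  | zero => intro v idx _; rfl
  | succ i ih =>
    intro v idx hv
    simp only [pvF]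
    rw [if_neg (by rintro ⟨h, _⟩; exact hv h)]
    exact ih v idx hv

-- A's loop splits into two independent single-target loops (the break is a no-op for the result)
lemma pvALoop_split (lines : List String) :
    ∀ i h s hi si, pvALoop lines i (h, s, hi, si) =
      ((pvF lines "HEADLINE:" 9 i (h, hi)).1, (pvF lines "SUBHEADLINE:" 12 i (s, si)).1,
       (pvF lines "HEADLINE:" 9 i (h, hi)).2, (pvF lines "SUBHEADLINE:" 12 i (s, si)).2) := by
  intro i
  induction i with
  | zero => intro h s hi si; rfl
  | succ i ih =>
    intro h s hi si
    simp only [pvALoop, pvF]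
    by_cases c1 : h = "" ∧ PySem.Str.startswith (PySem.Str.strip (lines.getD i "")) "HEADLINE:"
    · have hS : ¬ (s = "" ∧ PySem.Str.startswith (PySem.Str.strip (lines.getD i "")) "SUBHEADLINE:") := by
        rintro ⟨_, h2⟩; exact pv_not_both _ ⟨c1.2, h2⟩
      rw [if_pos c1, if_pos c1, if_neg hS]
      by_cases b : pvVal (PySem.Str.strip (lines.getD i "")) 9 ≠ "" ∧ s ≠ ""
      · rw [if_pos b, pvF_locked _ _ _ i _ _ b.1, pvF_locked _ _ _ i _ _ b.2]
      · rw [if_neg b]; exact ih _ _ _ _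
    · rw [if_neg c1, if_neg c1]
      by_cases c2 : s = "" ∧ PySem.Str.startswith (PySem.Str.strip (lines.getD i "")) "SUBHEADLINE:"
      · rw [if_pos c2, if_pos c2]
        by_cases b : h ≠ "" ∧ pvVal (PySem.Str.strip (lines.getD i "")) 12 ≠ ""
        · rw [if_pos b, pvF_locked _ _ _ i _ _ b.1, pvF_locked _ _ _ i _ _ b.2]
        · rw [if_neg b]; exact ih _ _ _ _
      · rw [if_neg c2, if_neg c2]
        by_cases b : h ≠ "" ∧ s ≠ ""
        · rw [if_pos b, pvF_locked _ _ _ i _ _ b.1, pvF_locked _ _ _ i _ _ b.2]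
        · rw [if_neg b]; exact ih _ _ _ _

-- pvF only reads indices below its counter
lemma pvF_append (ys : List String) (y : String) (p : String) (plen : Int) :
    ∀ i, i ≤ ys.length → ∀ st, pvF (ys ++ [y]) p plen i st = pvF ys p plen i st := by
  intro i
  induction i with
  | zero => intro _ st; rfl
  | succ i ih =>
    intro hle st
    obtain ⟨v, idx⟩ := st
    have hg : (ys ++ [y]).getD i "" = ys.getD i "" := by
      have hi : i < ys.length := by omega
      simp [List.getD, List.getElem?_append_left hi]
    simp only [pvF, hg]
    exact ih (by omega) _

lemma pvMatches_append (ys : List String) (y : String) (p : String) :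
    pvMatches (ys ++ [y]) p = pvMatches ys p ++
      (if PySem.Str.startswith (PySem.Str.strip y) p then
        [((ys.length : Int), pvVal (PySem.Str.strip y) (PySem.Str.len p))] else []) := by
  simp only [pvMatches, List.map_append, List.map_cons, List.map_nil,
    PySem.List.enumerate_append, PySem.List.enumerate_cons, PySem.List.enumerate_nil,
    List.filter_append]
  by_cases hm : PySem.Str.startswith (PySem.Str.strip y) p
  · simp at hm ⊢
    simp [hm]
  · simp at hm ⊢
    simp [hm]

lemma pvCombine_append (st : String × Option Int) (M : List (Int × String)) (i : Int) (w : String) :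
    pvCombine st (M ++ [(i, w)]) = pvCombine (if st.1 = "" then (w, some i) else st) M := by
  obtain ⟨v, idx⟩ := st
  by_cases hv : v = ""
  · subst hv
    by_cases hw : w = ""
    · subst hw
      simp only [pvCombine, List.filter_append]
      cases M with
      | nil => simp
      | cons a t => simp
    · simp [pvCombine, hw, List.filter_append]
  · simp [pvCombine, hv]

-- the backward loop over the whole list computes pvCombine of the in-order match list
lemma pvF_eq_combine (p : String) :
    ∀ (ys : List String) (st : String × Option Int),
      pvF ys p (PySem.Str.len p) ys.length st = pvCombine st (pvMatches ys p) := by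
  intro ys
  induction ys using List.reverseRecOn with
  | nil =>
    intro st
    obtain ⟨v, idx⟩ := st
    by_cases hv : v = "" <;> simp [pvF, pvCombine, pvMatches, PySem.List.enumerate_nil, hv]
  | append_singleton ys y ih =>
    intro st
    obtain ⟨v, idx⟩ := st
    have hlen : (ys ++ [y]).length = ys.length + 1 := by simp
    rw [hlen]
    have hg : (ys ++ [y]).getD ys.length "" = y := by simp
    simp only [pvF, hg]
    rw [pvF_append ys y p _ ys.length le_rfl]
    rw [pvMatches_append]
    by_cases hm : PySem.Str.startswith (PySem.Str.strip y) p
    · rw [if_pos hm, pvCombine_append]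
      by_cases hv : v = ""
      · rw [if_pos (And.intro hv hm), if_pos hv, ih]
      · rw [if_neg (by rintro ⟨h, _⟩; exact hv h), if_neg hv, ih]
    · rw [if_neg hm, List.append_nil,
        if_neg (by rintro ⟨_, h2⟩; exact hm h2), ih]

-- Pre_'s marker-value list is the value column of B's match list
lemma pvMark_eq_aux (p : String) :
    ∀ (xs : List String) (s : Int),
      (((PySem.List.enumerate xs s).filter (fun m => PySem.Str.startswith m.2 p)).map
          (fun m => pvVal m.2 (PySem.Str.len p)))
        = ((xs.filter (fun t => PySem.Str.startswith t p)).map (fun t => pvVal t (PySem.Str.len p))) := by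
  intro xs
  induction xs with
  | nil => intro s; simp [PySem.List.enumerate_nil]
  | cons x xs ih =>
    intro s
    rw [PySem.List.enumerate_cons]
    have ih' := ih (s + 1)
    simp only [PySem.Str.startswith_eq, PySem.Str.len, String.length_toList] at ih'
    by_cases hx : PySem.Chars.startswith x.toList p.toList = true <;>
      simp [hx, ih']

lemma pvMark_eq (lines : List String) (p : String) :
    pvMark lines p = (pvMatches lines p).map (·.2) := by
  simp only [pvMark, pvMatches, List.map_map]
  rw [← pvMark_eq_aux p (lines.map PySem.Str.strip) 0]
  rfl

-- under Pre_'s condition the backward lock-loop just keeps the last match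
lemma pvCombine_last (M : List (Int × String))
    (h : (M.map (·.2)).length ≤ 1 ∨ (M.map (·.2)).getLastD "" ≠ "") :
    pvCombine ("", none) M =
      (match M.getLast? with | some m => (m.2, some m.1) | none => ("", none)) := by
  induction M using List.reverseRecOn with
  | nil => rfl
  | append_singleton ys m _ =>
    cases ys with
    | nil =>
      by_cases hm : m.2 = "" <;> simp [pvCombine, hm]
    | cons a t =>
      have hm : m.2 ≠ "" := by
        rcases h with h | h
        · simp at h
        · intro e
          apply h
          have hmap : List.map (fun x : Int × String => x.2) (a :: t ++ [m])
              = (List.map (fun x : Int × String => x.2) (a :: t)) ++ [m.2] := by simp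
          rw [hmap, e, List.getLastD_concat]
      have hf : List.filter (fun q : Int × String => decide (q.2 ≠ "")) [m] = [m] := by
        simp [hm]
      have hsplit : (a :: t ++ [m]) = (a :: t) ++ [m] := rfl
      have h2 : (List.filter (fun q : Int × String => decide (q.2 ≠ "")) (a :: t ++ [m])).getLast?
          = some m := by
        rw [hsplit, List.filter_append, hf, List.getLast?_concat]
      have h1 : (a :: t ++ [m]).getLast? = some m := by
        rw [hsplit, List.getLast?_concat]
      simp only [pvCombine, h2, h1]
      simp

-- B's pick is the (swapped) combine result under Pre_'s condition
lemma pvPickLast_eq (lines : List String) (p : String)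
    (h : (pvMark lines p).length ≤ 1 ∨ (pvMark lines p).getLastD "" ≠ "") :
    ((pvPickLast lines p).2, (pvPickLast lines p).1) = pvCombine ("", none) (pvMatches lines p) := by
  rw [pvMark_eq] at h
  rw [pvCombine_last (pvMatches lines p) h]
  cases hL : (pvMatches lines p).getLast? <;> simp [pvPickLast, hL]

lemma pv_filter_pred (hi si : Option Int) (m : Int) :
    (!((match si with
        | some i => (match hi with | some j => (PySem.Set.empty : PySem.Set Int).add j | none => (PySem.Set.empty : PySem.Set Int)).add i
        | none => (match hi with | some j => (PySem.Set.empty : PySem.Set Int).add j | none => (PySem.Set.empty : PySem.Set Int))).contains m))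
      = (some m != hi && some m != si) := by
  cases hi with
  | none =>
    cases si with
    | none => simp [PySem.Set.empty]
    | some i => by_cases h : m = i <;> simp [PySem.Set.add, PySem.Set.empty, h]
  | some j =>
    cases si with
    | none => by_cases h : m = j <;> simp [PySem.Set.add, PySem.Set.empty, h]
    | some i =>
      by_cases h1 : m = j <;> by_cases h2 : m = i <;> by_cases h3 : i = j <;>
        simp_all [PySem.Set.add, PySem.Set.empty]

-- ===== VERDICT (by name: the statement is the Claim_ definition above) =====
theorem extract_headline_py_spec : Claim_equal_extract_headline_py := by
  intro text _ hpre
  obtain ⟨hH, hS⟩ := hpre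
  simp only [Spec_extract_headline_py, extract_headline_py, extract_headline_py_alt]
  have e9 : (9 : Int) = PySem.Str.len "HEADLINE:" := rfl
  have e12 : (12 : Int) = PySem.Str.len "SUBHEADLINE:" := rfl
  set lines := (PySem.Str.split? text "\n").getD [] with hl
  rw [pvALoop_split lines lines.length "" "" none none, e9, e12,
    pvF_eq_combine "HEADLINE:" lines ("", none), pvF_eq_combine "SUBHEADLINE:" lines ("", none),
    ← pvPickLast_eq lines "HEADLINE:" hH, ← pvPickLast_eq lines "SUBHEADLINE:" hS]
  simp only
  have hpred :
      (fun m : Int × String =>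
        (!((match (pvPickLast lines "SUBHEADLINE:").1 with
            | some i => (match (pvPickLast lines "HEADLINE:").1 with
                | some j => (PySem.Set.empty : PySem.Set Int).add j | none => (PySem.Set.empty : PySem.Set Int)).add i
            | none => (match (pvPickLast lines "HEADLINE:").1 with
                | some j => (PySem.Set.empty : PySem.Set Int).add j | none => (PySem.Set.empty : PySem.Set Int))).contains m.1)))
      = (fun m : Int × String =>
          some m.1 != (pvPickLast lines "HEADLINE:").1 &&
          some m.1 != (pvPickLast lines "SUBHEADLINE:").1) :=
    funext fun m => pv_filter_pred _ _ m.1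
  rw [hpred]
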